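-- pv_equiv track=rewrite | github.com/dorg-ihu/gg-extraction-2022 | gg18/isolation_testing.py | parenthesis_line_merging
-- ===== SOURCE A (Python) =====
-- def parenthesis_line_merging(doc):
--     texts = doc.splitlines()
--     new_texts = []
--     last_merged = False
--     for i, text in enumerate(texts):
--         if not last_merged:
--             open_par, close_par = text.rfind("("), text.rfind(")")
--             if open_par <= close_par:
--                 new_texts.append(text)
--             else:
--                 new_texts.append(texts[i] + texts[i+1])
--                 last_merged = True
--         else:
--             last_merged = False
--             continue
--     doc = "\n".join(new_texts)
--     return doc
-- ===== SOURCE B (Python) =====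
-- def parenthesis_line_merging(doc):
--     def unbal(t):
--         return t.rfind("(") > t.rfind(")")
--
--     def merge(lines):
--         if not lines:
--             return []
--         # maximal leading run of lines sharing the balance status of lines[0]
--         n = 1
--         while n < len(lines) and unbal(lines[n]) == unbal(lines[0]):
--             n += 1
--         run, rest = lines[:n], lines[n:]
--         if not unbal(lines[0]):
--             return run + merge(rest)
--         pairs = []
--         while len(run) >= 2:
--             pairs.append(run[0] + run[1])
--             run = run[2:]
--         if not run:
--             return pairs + merge(rest)
--         if rest:
--             return pairs + [run[0] + rest[0]] + merge(rest[1:])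
--         return pairs + [run[0]]
--
--     return "\n".join(merge(doc.splitlines()))
-- ===== Notes on version B (the rewrite author's own statement) =====
-- stated objective: alternative
-- what changed: B replaces A's single line-by-line scan with a last_merged skip-flag by a run decomposition: it recursively splits the line list into maximal runs of equal parenthesis-balance status, copies balanced runs through, and pairs lines inside unbalanced runs with a leftover line grabbing the first line of the next run.
-- outside the precondition, e.g. on parenthesis_line_merging('('): A raises IndexError, B returns '('
import Mathlib
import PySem

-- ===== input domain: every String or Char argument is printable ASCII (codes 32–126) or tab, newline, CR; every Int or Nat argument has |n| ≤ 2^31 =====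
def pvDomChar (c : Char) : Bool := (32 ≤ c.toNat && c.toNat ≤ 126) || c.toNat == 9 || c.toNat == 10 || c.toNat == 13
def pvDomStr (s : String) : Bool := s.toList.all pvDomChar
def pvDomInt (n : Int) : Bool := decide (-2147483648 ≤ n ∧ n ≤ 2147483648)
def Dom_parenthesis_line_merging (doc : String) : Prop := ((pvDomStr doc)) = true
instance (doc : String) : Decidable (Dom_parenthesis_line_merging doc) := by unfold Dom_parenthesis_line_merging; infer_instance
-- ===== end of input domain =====

-- B replaces A's line-by-line scan with a skip flag by a run decomposition: it cuts the line list
-- into maximal runs of equal parenthesis-balance status and pairs lines inside unbalanced runs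
-- (objective: alternative algorithm, same cost).

-- ===== PORT A =====
-- for i, text in enumerate(texts): structural recursion on the line list, carrying the index i,
-- the accumulator new_texts and the last_merged flag.  texts[i+1] → pyGet? (IndexError = none,
-- totalized with getD ""; exactly those inputs are excluded by Pre_ below).
def pvLoopA (texts : List String) : List String → Nat → List String → Bool → List String
  | [], _i, acc, _last_merged => acc
  | text :: rest, i, acc, last_merged =>
    if last_merged then
      -- last_merged = False; continue
      pvLoopA texts rest (i + 1) acc false
    else
      let open_par := PySem.Str.rfind text "("
      let close_par := PySem.Str.rfind text ")"
      if open_par ≤ close_par then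
        pvLoopA texts rest (i + 1) (acc ++ [text]) false
      else
        pvLoopA texts rest (i + 1) (acc ++ [text ++ ((PySem.List.pyGet? texts ((i : Int) + 1)).getD "")]) true

def parenthesis_line_merging (doc : String) : String :=
  let texts := PySem.Str.splitlines doc
  PySem.Str.join "\n" (pvLoopA texts texts 0 [] false)

-- ===== PORT B =====
-- unbal(t) = t.rfind("(") > t.rfind(")")
def pvUnbal (t : String) : Bool := PySem.Str.rfind t ")" < PySem.Str.rfind t "("

-- while n < len(lines) and unbal(lines[n]) == unbal(lines[0]): n += 1
-- (b is unbal(lines[0]), computed at the call site; lines is never shortened here)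
def pvRunLen (lines : List String) (b : Bool) (n : Nat) : Nat :=
  if h : n < lines.length then
    if pvUnbal lines[n] == b then pvRunLen lines b (n + 1) else n
  else n
termination_by lines.length - n

-- while len(run) >= 2: pairs.append(run[0] + run[1]); run = run[2:]
def pvPairLoop (pairs : List String) : List String → List String × List String
  | a :: b :: t => pvPairLoop (pairs ++ [a ++ b]) t
  | run => (pairs, run)

-- the port cites this for termination (rest = lines[n:] with n ≥ 1 is strictly shorter)
theorem pvRunLen_ge (lines : List String) (b : Bool) (n : Nat) : n ≤ pvRunLen lines b n := by
  fun_induction pvRunLen <;> omega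

def pvMergeB (lines : List String) : List String :=
  if _hne : lines = [] then [] else
    let n := pvRunLen lines (pvUnbal (lines.headD "")) 1   -- unbal(lines[0]); lines ≠ []
    let run := PySem.List.slice lines none (some (n : Int))      -- lines[:n]
    let rest := PySem.List.slice lines (some (n : Int)) none     -- lines[n:]
    if pvUnbal (lines.headD "") = false then run ++ pvMergeB rest
    else
      match pvPairLoop [] run with
      | (pairs, []) => pairs ++ pvMergeB rest
      | (pairs, r0 :: _) =>
        if rest = [] then pairs ++ [r0]
        else pairs ++ [r0 ++ rest.headD ""] ++ pvMergeB (PySem.List.slice rest (some 1) none)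
termination_by lines.length
decreasing_by
  all_goals
    have h1 := pvRunLen_ge lines (pvUnbal (lines.headD "")) 1
    have h0 : 0 < lines.length := List.length_pos_iff.mpr _hne
    simp only [List.headD_eq_head?_getD] at h1
    simp [PySem.List.slice_from_natCast, PySem.List.slice_from_one]
    omega

def parenthesis_line_merging_alt (doc : String) : String :=
  PySem.Str.join "\n" (pvMergeB (PySem.Str.splitlines doc))

-- ===== PRECONDITION & SPEC =====
-- A line is "unbalanced" when its last '(' comes after its last ')'.
def pvUnbalSpec (s : String) : Bool := PySem.Str.rfind s ")" < PySem.Str.rfind s "("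
-- Python A raises IndexError (texts[i+1] past the end) exactly when the trailing maximal run of
-- consecutive unbalanced lines has odd length; Pre_ excludes exactly those inputs.
def Pre_parenthesis_line_merging (doc : String) : Prop :=
  ((PySem.Str.splitlines doc).reverse.takeWhile pvUnbalSpec).length % 2 = 0
instance (doc : String) : Decidable (Pre_parenthesis_line_merging doc) := by
  unfold Pre_parenthesis_line_merging; infer_instance

def pvWitness_parenthesis_line_merging : String := "f(x)\ng(\ny) z"

def Spec_parenthesis_line_merging (doc : String) (out : String) : Prop := out = parenthesis_line_merging_alt doc
instance (doc : String) (out : String) : Decidable (Spec_parenthesis_line_merging doc out) := by unfold Spec_parenthesis_line_merging; infer_instance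

-- ===== CLAIM (what is proved, stated in full; the proofs are below) =====
def Claim_equal_parenthesis_line_merging : Prop := ∀ (doc : String), Dom_parenthesis_line_merging doc → Pre_parenthesis_line_merging doc → Spec_parenthesis_line_merging doc (parenthesis_line_merging doc)
-- ===== LEMMAS AND PROOFS =====

-- Clean structural recursion equal to A's flag loop: append a balanced line, merge an unbalanced
-- line with the next one and skip it.
def pvGoA : List String → List String
  | [] => []
  | t :: rest =>
    if PySem.Str.rfind t "(" ≤ PySem.Str.rfind t ")" then t :: pvGoA rest
    else (t ++ rest.headD "") :: pvGoA (rest.drop 1)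
termination_by l => l.length
decreasing_by all_goals simp

theorem pvLoopA_eq_goA (texts : List String) (k : Nat) :
    ∀ i acc, texts.length - i ≤ k →
      pvLoopA texts (texts.drop i) i acc false = acc ++ pvGoA (texts.drop i) := by
  induction k with
  | zero =>
    intro i acc h
    have hi : texts.length ≤ i := by omega
    rw [List.drop_eq_nil_of_le hi]
    rw [show pvGoA [] = [] from by simp [pvGoA]]
    simp [pvLoopA]
  | succ k ih =>
    intro i acc h
    by_cases hi : i < texts.length
    · rw [List.drop_eq_getElem_cons hi]
      by_cases hb : PySem.Str.rfind texts[i] "(" ≤ PySem.Str.rfind texts[i] ")"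
      · rw [pvGoA]
        simp only [pvLoopA, hb, if_true, if_false, Bool.false_eq_true]
        rw [ih (i + 1) (acc ++ [texts[i]]) (by omega)]
        simp
      · -- merged value: texts[i+1] totalized = head of the rest of the suffix
        have hget : (PySem.List.pyGet? texts ((i : Int) + 1)).getD ""
            = (texts.drop (i + 1)).headD "" := by
          rw [show ((i : Int) + 1) = ((i + 1 : Nat) : Int) by push_cast; ring]
          rw [PySem.List.pyGet?_natCast]
          rw [List.headD_eq_head?_getD, List.head?_drop]
        rw [pvGoA]
        simp only [pvLoopA, hb, if_false, Bool.false_eq_true]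
        rw [hget]
        cases hrest : texts.drop (i + 1) with
        | nil =>
          simp only [List.drop_nil, List.headD_nil]
          rw [show pvGoA [] = [] from by simp [pvGoA]]
          simp [pvLoopA]
        | cons r rest' =>
          have hrest' : rest' = texts.drop (i + 2) := by
            have := congrArg List.tail hrest
            simpa [List.tail_drop] using this.symm
          simp only [pvLoopA, if_true, List.headD_cons, List.drop_succ_cons, List.drop_zero]
          rw [hrest', ih (i + 2) (acc ++ [texts[i] ++ r]) (by omega)]
          simp
    · have hle : texts.length ≤ i := by omega
      rw [List.drop_eq_nil_of_le hle]
      rw [show pvGoA [] = [] from by simp [pvGoA]]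
      simp [pvLoopA]

-- unbalancedness bridges
theorem pvUnbal_false_iff (t : String) :
    pvUnbal t = false ↔ PySem.Str.rfind t "(" ≤ PySem.Str.rfind t ")" := by
  simp [pvUnbal]

theorem pvUnbal_true_iff (t : String) :
    pvUnbal t = true ↔ ¬ PySem.Str.rfind t "(" ≤ PySem.Str.rfind t ")" := by
  simp [pvUnbal]

-- a run of balanced lines passes through pvGoA unchanged
theorem pvGoA_balanced (run rest : List String) (h : ∀ t ∈ run, pvUnbal t = false) :
    pvGoA (run ++ rest) = run ++ pvGoA rest := by
  induction run with
  | nil => simp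
  | cons a t ih =>
    have ha := (pvUnbal_false_iff a).mp (h a (by simp))
    rw [List.cons_append, pvGoA]
    simp only [ha, if_true]
    rw [ih (fun x hx => h x (by simp [hx]))]
    simp

-- structural companions of pvPairLoop
def pvPairsSpec : List String → List String
  | a :: b :: t => (a ++ b) :: pvPairsSpec t
  | _ => []
def pvRemSpec : List String → List String
  | _ :: _ :: t => pvRemSpec t
  | r => r

theorem pvPairLoop_eq (run : List String) :
    ∀ pairs, pvPairLoop pairs run = (pairs ++ pvPairsSpec run, pvRemSpec run) := by
  fun_induction pvPairsSpec run with
  | case1 a b t ih => intro pairs; simp [pvPairLoop, pvRemSpec, ih]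
  | case2 r hr =>
    intro pairs
    match r, hr with
    | [], _ => simp [pvPairLoop, pvRemSpec]
    | [a], _ => simp [pvPairLoop, pvRemSpec]
    | a :: b :: t, hr => exact (hr a b t rfl).elim

-- a run of unbalanced lines is consumed pairwise, a leftover line grabs the next line blindly
theorem pvGoA_unbal (run rest : List String) (h : ∀ t ∈ run, pvUnbal t = true) :
    pvGoA (run ++ rest)
      = pvPairsSpec run ++ (match pvRemSpec run with
          | [] => pvGoA rest
          | r0 :: _ => (r0 ++ rest.headD "") :: pvGoA (rest.drop 1)) := by
  fun_induction pvPairsSpec run with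
  | case1 a b t ih =>
    have ha := (pvUnbal_true_iff a).mp (h a (by simp))
    rw [List.cons_append, pvGoA]
    simp only [ha, if_false]
    rw [show ((b :: t ++ rest).headD "") = b by simp,
        show ((b :: t ++ rest).drop 1) = t ++ rest by simp]
    rw [ih (fun x hx => h x (by simp at hx ⊢; tauto))]
    simp [pvRemSpec]
  | case2 r hr =>
    match r, hr with
    | [], _ =>
      rw [show pvRemSpec [] = [] from rfl]
      simp
    | [a], _ =>
      have ha := (pvUnbal_true_iff a).mp (h a (by simp))
      rw [List.cons_append, pvGoA]
      rw [show pvRemSpec [a] = [a] from rfl]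
      rw [if_neg ha]
      simp
    | a :: b :: t, hr => exact (hr a b t rfl).elim

-- elements of the run computed by pvRunLen all carry status b (index 0 by assumption)
theorem pvRunLen_status (lines : List String) (b : Bool) :
    ∀ n, ∀ j (hj : j < lines.length), n ≤ j → j < pvRunLen lines b n → pvUnbal lines[j] = b := by
  intro n
  fun_induction pvRunLen lines b n with
  | case1 n hn hb ih =>
    intro j hj hnj hjr
    rcases Nat.eq_or_lt_of_le hnj with h | h
    · subst h; simpa using hb
    · exact ih j hj h hjr
  | case2 n hn hb => intro j hj hnj hjr; omega
  | case3 n hn => intro j hj hnj hjr; omega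

theorem take_status (lines : List String) :
    ∀ t ∈ lines.take (pvRunLen lines (pvUnbal (lines.headD "")) 1),
      pvUnbal t = pvUnbal (lines.headD "") := by
  intro t ht
  rw [List.mem_take_iff_getElem] at ht
  obtain ⟨j, hj, rfl⟩ := ht
  have hj1 : j < lines.length := lt_of_lt_of_le hj (by simp)
  rcases Nat.eq_zero_or_pos j with rfl | hpos
  · cases lines with
    | nil => simp at hj1
    | cons a l => simp
  · exact pvRunLen_status lines (pvUnbal (lines.headD "")) 1 j hj1 hpos (by omega)

-- B's run-based recursion computes pvGoA
theorem pvMergeB_eq_goA (lines : List String) : pvMergeB lines = pvGoA lines := by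
  fun_induction pvMergeB lines with
  | case1 => rw [show pvGoA [] = [] from by simp [pvGoA]]
  | case2 x hne n run rest hb ih =>
    -- balanced run
    have hrun : run = x.take n := by
      rw [show run = PySem.List.slice x none (some (n : Int)) from rfl,
          PySem.List.slice_to_natCast]
    have hrest : rest = x.drop n := by
      rw [show rest = PySem.List.slice x (some (n : Int)) none from rfl,
          PySem.List.slice_from_natCast]
    have hstat : ∀ t ∈ x.take n, pvUnbal t = false :=
      fun t ht => (take_status x t ht).trans hb
    rw [hrun, ih, hrest]
    conv_rhs => rw [← List.take_append_drop n x]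
    rw [pvGoA_balanced _ _ hstat]
  | case3 x hne n run rest hb pairs hpair ih =>
    -- unbalanced run, all lines paired inside the run
    have hrun : run = x.take n := by
      rw [show run = PySem.List.slice x none (some (n : Int)) from rfl,
          PySem.List.slice_to_natCast]
    have hrest : rest = x.drop n := by
      rw [show rest = PySem.List.slice x (some (n : Int)) none from rfl,
          PySem.List.slice_from_natCast]
    have hb' : pvUnbal (x.headD "") = true := by revert hb; cases pvUnbal (x.headD "") <;> simp
    have hstat : ∀ t ∈ x.take n, pvUnbal t = true :=
      fun t ht => (take_status x t ht).trans hb'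
    rw [pvPairLoop_eq, hrun] at hpair
    simp only [List.nil_append, Prod.mk.injEq] at hpair
    obtain ⟨hp, hr⟩ := hpair
    rw [ih, hrest]
    conv_rhs => rw [← List.take_append_drop n x]
    rw [pvGoA_unbal _ _ hstat, hp, hr]
  | case4 x hne n run rest hb pairs r0 rem hpair hrest0 =>
    -- unbalanced run with a leftover line and no following line
    have hrun : run = x.take n := by
      rw [show run = PySem.List.slice x none (some (n : Int)) from rfl,
          PySem.List.slice_to_natCast]
    have hrest : x.drop n = [] := by
      rw [show rest = PySem.List.slice x (some (n : Int)) none from rfl,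
          PySem.List.slice_from_natCast] at hrest0
      exact hrest0
    have hb' : pvUnbal (x.headD "") = true := by revert hb; cases pvUnbal (x.headD "") <;> simp
    have hstat : ∀ t ∈ x.take n, pvUnbal t = true :=
      fun t ht => (take_status x t ht).trans hb'
    rw [pvPairLoop_eq, hrun] at hpair
    simp only [List.nil_append, Prod.mk.injEq] at hpair
    obtain ⟨hp, hr⟩ := hpair
    conv_rhs => rw [← List.take_append_drop n x, hrest]
    rw [pvGoA_unbal _ _ hstat, hp, hr]
    rw [show pvGoA (List.drop 1 ([] : List String)) = [] from by simp [pvGoA]]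
    simp
  | case5 x hne n run rest hb pairs r0 rem hpair hrestne ih =>
    -- unbalanced run with a leftover line: it grabs the next line
    have hrun : run = x.take n := by
      rw [show run = PySem.List.slice x none (some (n : Int)) from rfl,
          PySem.List.slice_to_natCast]
    have hrest : rest = x.drop n := by
      rw [show rest = PySem.List.slice x (some (n : Int)) none from rfl,
          PySem.List.slice_from_natCast]
    have hb' : pvUnbal (x.headD "") = true := by revert hb; cases pvUnbal (x.headD "") <;> simp
    have hstat : ∀ t ∈ x.take n, pvUnbal t = true :=
      fun t ht => (take_status x t ht).trans hb'
    rw [pvPairLoop_eq, hrun] at hpair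
    simp only [List.nil_append, Prod.mk.injEq] at hpair
    obtain ⟨hp, hr⟩ := hpair
    have htail : PySem.List.slice rest (some 1) none = rest.tail :=
      PySem.List.slice_from_one rest
    rw [htail] at ih
    rw [htail, ih]
    conv_rhs => rw [← List.take_append_drop n x]
    rw [pvGoA_unbal _ _ hstat, hp, hr, ← hrest]
    rw [show rest.drop 1 = rest.tail from by simp [List.drop_one]]
    simp

-- ===== VERDICT (by name: the statement is the Claim_ definition above) =====
theorem parenthesis_line_merging_spec : Claim_equal_parenthesis_line_merging := by
  intro doc _ _
  unfold Spec_parenthesis_line_merging parenthesis_line_merging parenthesis_line_merging_alt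
  have := pvLoopA_eq_goA (PySem.Str.splitlines doc) (PySem.Str.splitlines doc).length 0 [] (by omega)
  simp only [List.drop_zero, List.nil_append] at this
  show PySem.Str.join "\n" (pvLoopA (PySem.Str.splitlines doc) (PySem.Str.splitlines doc) 0 [] false)
      = PySem.Str.join "\n" (pvMergeB (PySem.Str.splitlines doc))
  rw [this, pvMergeB_eq_goA]
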